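-- pv_equiv track=rewrite | github.com/teenu/noobai-xl-modular | utils.py | generate_smart_schedule
-- ===== SOURCE A (Python) =====
-- from typing import Tuple, Dict, Any, List, Optional, Sequence
--
-- def generate_smart_schedule(num_steps: int) -> List[int]:
--     """
--     Generate smart toggle schedule: ON,OFF through step 20, then ON for remainder.
--
--     Args:
--         num_steps: Total number of diffusion steps
--
--     Returns:
--         List of 0/1 values
--     """
--     if num_steps <= 0:
--         return []
--     schedule = []
--     for i in range(num_steps):
--         if i <= 19:
--             # Alternating phase (indices 0-19)
--             schedule.append(1 if i % 2 == 0 else 0)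
--         else:
--             # Always ON phase (index 20+)
--             schedule.append(1)
--     return schedule
-- ===== SOURCE B (Python) =====
-- def generate_smart_schedule(num_steps: int):
--     """Precomputed alternating prefix plus constant fill, instead of a per-index branching loop."""
--     if num_steps <= 0:
--         return []
--     pattern = [1, 0] * 10  # the 20-step alternating phase
--     if num_steps <= 20:
--         return pattern[:num_steps]
--     return pattern + [1] * (num_steps - 20)
-- ===== Notes on version B (the rewrite author's own statement) =====
-- stated objective: simpler
-- what changed: Replaces the per-index branching loop with a precomputed alternating prefix plus a bulk list-repetition fill of 1s.
import Mathlib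
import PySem

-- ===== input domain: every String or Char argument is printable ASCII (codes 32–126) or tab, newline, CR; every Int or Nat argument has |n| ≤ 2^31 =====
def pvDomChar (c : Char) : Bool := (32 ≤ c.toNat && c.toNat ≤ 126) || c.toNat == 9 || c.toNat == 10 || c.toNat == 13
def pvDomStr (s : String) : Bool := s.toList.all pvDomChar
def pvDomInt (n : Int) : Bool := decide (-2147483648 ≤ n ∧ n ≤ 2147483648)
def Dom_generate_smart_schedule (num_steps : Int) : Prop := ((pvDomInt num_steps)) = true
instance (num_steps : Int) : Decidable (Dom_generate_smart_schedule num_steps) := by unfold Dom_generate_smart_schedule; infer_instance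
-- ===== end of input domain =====

-- ===== PORT A =====
-- literal port of A: build the schedule by folding over range(num_steps), branching per index
def generate_smart_schedule (num_steps : Int) : List Int :=
  if num_steps <= 0 then []
  else
    (PySem.List.pyRange 0 num_steps 1).foldl
      (fun schedule i =>
        if i <= 19 then
          schedule ++ [if PySem.Int.mod i 2 = 0 then (1 : Int) else 0]
        else
          schedule ++ [(1 : Int)]) []

-- ===== PORT B =====
-- port of B: precomputed 20-step alternating pattern, sliced or extended with a block of 1s
def pvPattern : List Int := (List.replicate 10 ([1, 0] : List Int)).flatten

def generate_smart_schedule_alt (num_steps : Int) : List Int :=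
  if num_steps <= 0 then []
  else if num_steps <= 20 then PySem.List.slice pvPattern none (some num_steps)
  else pvPattern ++ List.replicate (num_steps - 20).toNat 1

-- ===== PRECONDITION & SPEC =====
def Spec_generate_smart_schedule (num_steps : Int) (out : List Int) : Prop := out = generate_smart_schedule_alt num_steps
instance (num_steps : Int) (out : List Int) : Decidable (Spec_generate_smart_schedule num_steps out) := by unfold Spec_generate_smart_schedule; infer_instance

-- ===== CLAIM (what is proved, stated in full; the proofs are below) =====
def Claim_equal_generate_smart_schedule : Prop := ∀ (num_steps : Int), Dom_generate_smart_schedule num_steps → Spec_generate_smart_schedule num_steps (generate_smart_schedule num_steps)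

-- ===== LEMMAS AND PROOFS =====

-- A's fold, rewritten as a map over List.range (Nat indices)
lemma A_as_map (n : Int) (h : 0 < n) :
    generate_smart_schedule n =
      (List.range n.toNat).map
        (fun k => if k ≤ 19 then (if k % 2 = 0 then (1 : Int) else 0) else 1) := by
  unfold generate_smart_schedule
  rw [if_neg (by omega)]
  have hfun : (fun (schedule : List Int) (i : Int) =>
      if i <= 19 then schedule ++ [if PySem.Int.mod i 2 = 0 then (1 : Int) else 0]
      else schedule ++ [(1 : Int)]) =
      (fun schedule i => schedule ++
        [if i <= 19 then (if PySem.Int.mod i 2 = 0 then (1 : Int) else 0) else 1]) := by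
    funext s i; split_ifs <;> rfl
  rw [hfun, PySem.List.foldl_append_singleton_eq_map, PySem.List.pyRange_one]
  simp only [List.map_map, Int.sub_zero]
  apply List.map_congr_left
  intro k _
  simp only [Function.comp, zero_add]
  have h1 : ((k : Int) ≤ 19) ↔ (k ≤ 19) := by exact_mod_cast Iff.rfl
  have h2 : PySem.Int.mod (k : Int) 2 = ((k % 2 : Nat) : Int) := by
    exact_mod_cast PySem.Int.mod_natCast k 2
  rw [h2]
  by_cases hk : k ≤ 19
  · rw [if_pos (h1.mpr hk), if_pos hk]
    by_cases hm : k % 2 = 0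
    · rw [if_pos (by exact_mod_cast hm), if_pos hm]
    · rw [if_neg (by exact_mod_cast hm), if_neg hm]
  · rw [if_neg (fun c => hk (h1.mp c)), if_neg hk]

-- ===== VERDICT (by name: the statement is the Claim_ definition above) =====
theorem generate_smart_schedule_spec : Claim_equal_generate_smart_schedule := by
  intro n _
  unfold Spec_generate_smart_schedule
  by_cases h0 : n <= 0
  · unfold generate_smart_schedule generate_smart_schedule_alt
    rw [if_pos h0, if_pos h0]
  · rw [not_le] at h0
    by_cases h20 : n <= 20
    · -- small case: 1 ≤ n ≤ 20, finitely many instances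
      interval_cases n <;> decide
    · -- large case: alternating prefix then constant 1s
      rw [not_le] at h20
      rw [A_as_map n h0]
      unfold generate_smart_schedule_alt
      rw [if_neg (by omega), if_neg (by omega)]
      have hm : n.toNat = 20 + (n.toNat - 20) := by omega
      rw [hm, List.range_add, List.map_append]
      have hpre : (List.range 20).map
          (fun k => if k ≤ 19 then (if k % 2 = 0 then (1 : Int) else 0) else 1) = pvPattern := by
        decide
      rw [hpre, List.map_map]
      have hconst : ∀ k ∈ List.range (n.toNat - 20),
          ((fun k => if k ≤ 19 then (if k % 2 = 0 then (1 : Int) else 0) else 1) ∘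
            (fun x => 20 + x)) k = (fun _ => (1 : Int)) k := by
        intro k _
        simp only [Function.comp]
        rw [if_neg (by omega)]
      rw [List.map_congr_left hconst, List.map_const', List.length_range]
      have : (n - 20).toNat = n.toNat - 20 := by omega
      rw [this]
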